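-- pv_equiv track=rewrite | github.com/InteVleminckx/Compilers | project1/AST.py | parseFuncCallParameters
-- ===== SOURCE A (Python) =====
-- def parseFuncCallParameters(text):
--     params = []
--     # We gaan de text parsen
--     addNext = False
--     param = None
--     for chr in text:
--         if chr == '%':
--             addNext = True
--             param = "%"
--         elif addNext:
--             param += chr
--             if not chr.isdigit():
--                 addNext = False
--                 params.append(param)
--
--     return params
-- ===== SOURCE B (Python) =====
-- def parseFuncCallParameters(text):
--     params = []
--     for seg in text.split('%')[1:]:
--         k = 0
--         while k < len(seg) and seg[k].isdigit():
--             k += 1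
--         if k < len(seg):
--             params.append('%' + seg[:k + 1])
--     return params
-- ===== Notes on version B (the rewrite author's own statement) =====
-- stated objective: simpler
-- what changed: Replaces A's per-character addNext/param state machine with str.split on the percent sign followed by a leading-digit scan of each segment, appending the marker plus the digit run and its terminating character.
import Mathlib
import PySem

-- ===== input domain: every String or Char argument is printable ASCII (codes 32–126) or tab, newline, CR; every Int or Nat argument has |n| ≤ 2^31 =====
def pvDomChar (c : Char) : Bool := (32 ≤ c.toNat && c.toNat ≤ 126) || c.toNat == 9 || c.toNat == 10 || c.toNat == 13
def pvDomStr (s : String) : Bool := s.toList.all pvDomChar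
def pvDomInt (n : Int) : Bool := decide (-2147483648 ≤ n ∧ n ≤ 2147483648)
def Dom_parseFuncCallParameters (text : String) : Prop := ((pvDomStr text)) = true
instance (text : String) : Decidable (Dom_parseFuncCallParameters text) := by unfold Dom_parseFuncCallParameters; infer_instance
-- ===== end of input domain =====

-- B replaces A's per-character addNext state machine by split('%') plus a
-- per-segment leading-digit scan (objective: simpler decomposition; a timing run measured B faster by a constant factor).


-- ===== PORT A =====
-- state = (params, addNext, param); Python's `param` string is carried as List Char
def pvStepA (st : List String × Bool × List Char) (c : Char) : List String × Bool × List Char :=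
  let (params, addNext, param) := st
  if c = '%' then (params, true, ['%'])
  else if addNext then
    let param' := param ++ [c]
    if !(PySem.Chars.isdigit c) then (params ++ [String.ofList param'], false, param')
    else (params, true, param')
  else st

def parseFuncCallParameters (text : String) : List String :=
  (text.toList.foldl pvStepA ([], false, [])).1

-- ===== PORT B =====
-- k = length of the leading isdigit() run of a segment (Source B's while loop)
def pvLeadDigits : List Char → Nat
  | [] => 0
  | c :: r => if PySem.Chars.isdigit c then pvLeadDigits r + 1 else 0

def parseFuncCallParameters_alt (text : String) : List String :=
  ((PySem.Chars.splitOn text.toList ['%']).drop 1).foldl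
    (fun params seg =>
      let k := pvLeadDigits seg
      if k < seg.length then params ++ [String.ofList ('%' :: seg.take (k + 1))] else params)
    []

-- ===== PRECONDITION & SPEC =====
def Spec_parseFuncCallParameters (text : String) (out : List String) : Prop := out = parseFuncCallParameters_alt text
instance (text : String) (out : List String) : Decidable (Spec_parseFuncCallParameters text out) := by unfold Spec_parseFuncCallParameters; infer_instance

-- ===== CLAIM (what is proved, stated in full; the proofs are below) =====
def Claim_equal_parseFuncCallParameters : Prop := ∀ (text : String), Dom_parseFuncCallParameters text → Spec_parseFuncCallParameters text (parseFuncCallParameters text)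

-- ===== LEMMAS AND PROOFS =====

-- reference recursion for A's state machine (b = addNext, ds = digits collected after '%')
def pvRef (b : Bool) (ds : List Char) : List Char → List String
  | [] => []
  | c :: r =>
    if c = '%' then pvRef true [] r
    else if b then
      (if PySem.Chars.isdigit c then pvRef true (ds ++ [c]) r
       else String.ofList ('%' :: (ds ++ [c])) :: pvRef false [] r)
    else pvRef false ds r

lemma pvFoldA (cs : List Char) : ∀ (params : List String) (b : Bool) (ds p : List Char),
    (b = true → p = '%' :: ds) →
    (cs.foldl pvStepA (params, b, p)).1 = params ++ pvRef b ds cs := by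
  induction cs with
  | nil => intro params b ds p _; simp [pvRef]
  | cons c r ih =>
    intro params b ds p hp
    simp only [List.foldl_cons, pvStepA, pvRef]
    by_cases hc : c = '%'
    · simp [hc, ih params true [] ['%'] (by intro; rfl)]
    · cases b with
      | false => simp [hc, ih params false ds p (by simp)]
      | true =>
        rw [hp rfl]
        by_cases hd : PySem.Chars.isdigit c
        · simpa [hc, hd] using
            ih params true (ds ++ [c]) (('%' :: ds) ++ [c]) (by intro; rfl)
        · simpa [hc, hd] using
            ih (params ++ [String.ofList (('%' :: ds) ++ [c])]) false [] (('%' :: ds) ++ [c]) (by simp)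

-- split on '%' as a structural recursion, and its agreement with PySem.Chars.splitOn
def pvSplitPct : List Char → List (List Char)
  | [] => [[]]
  | c :: r =>
    if c = '%' then [] :: pvSplitPct r
    else match pvSplitPct r with
      | h :: t => (c :: h) :: t
      | [] => [[c]]

lemma pvSplitPct_ne_nil (cs : List Char) : pvSplitPct cs ≠ [] := by
  cases cs with
  | nil => simp [pvSplitPct]
  | cons c r =>
    simp only [pvSplitPct]
    split_ifs
    · simp
    · cases h : pvSplitPct r <;> simp

lemma pvSplitOnGo (fuel : Nat) : ∀ (l cur : List Char) (acc : List (List Char)),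
    l.length ≤ fuel →
    PySem.Chars.splitOn.go ['%'] fuel l cur acc =
      acc.reverse ++ (match pvSplitPct l with
        | h :: t => (cur.reverse ++ h) :: t
        | [] => []) := by
  induction fuel with
  | zero =>
    intro l cur acc hl
    have : l = [] := by cases l <;> simp_all
    subst this
    simp [PySem.Chars.splitOn.go, pvSplitPct]
  | succ fuel ih =>
    intro l cur acc hl
    cases l with
    | nil => simp [PySem.Chars.splitOn.go, pvSplitPct]
    | cons c r =>
      by_cases hc : c = '%'
      · subst hc
        rw [PySem.Chars.splitOn.go]
        simp only [List.isPrefixOf, Bool.and_true, beq_self_eq_true, if_pos]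
        rw [show List.drop (['%'].length) ('%' :: r) = r from rfl]
        rw [ih r [] (List.reverse cur :: acc) (by simpa using Nat.le_of_succ_le_succ hl)]
        have hne := pvSplitPct_ne_nil r
        cases h : pvSplitPct r with
        | nil => exact absurd h hne
        | cons h' t' => simp [pvSplitPct, h]
      · rw [PySem.Chars.splitOn.go]
        have hpre : List.isPrefixOf ['%'] (c :: r) = false := by
          simp [List.isPrefixOf]; exact fun h => hc h.symm
        rw [hpre]
        simp only [Bool.false_eq_true, if_false]
        rw [ih r (c :: cur) acc (by simpa using Nat.le_of_succ_le_succ hl)]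
        have hne := pvSplitPct_ne_nil r
        cases h : pvSplitPct r with
        | nil => exact absurd h hne
        | cons h' t' => simp [pvSplitPct, h, hc]

lemma pvSplitOn_eq (cs : List Char) : PySem.Chars.splitOn cs ['%'] = pvSplitPct cs := by
  rw [PySem.Chars.splitOn, pvSplitOnGo (cs.length + 1) cs [] [] (Nat.le_succ _)]
  have hne := pvSplitPct_ne_nil cs
  cases h : pvSplitPct cs with
  | nil => exact absurd h hne
  | cons h' t' => simp

-- B's per-segment contribution, generalised by the digits ds already read before the segment
def pvSeg (ds seg : List Char) : List String :=
  if pvLeadDigits seg < seg.length then [String.ofList ('%' :: (ds ++ seg.take (pvLeadDigits seg + 1)))] else []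

def pvBC (segs : List (List Char)) : List String := segs.flatMap (pvSeg [])

lemma pvFoldB (segs : List (List Char)) : ∀ (init : List String),
    (segs.foldl
      (fun params seg =>
        let k := pvLeadDigits seg
        if k < seg.length then params ++ [String.ofList ('%' :: seg.take (k + 1))] else params)
      init) = init ++ pvBC segs := by
  induction segs with
  | nil => intro init; simp [pvBC]
  | cons s t ih =>
    intro init
    simp only [List.foldl_cons]
    by_cases h : pvLeadDigits s < s.length
    · simp [h, ih, pvBC, pvSeg, List.flatMap_cons]
    · simp [h, ih, pvBC, pvSeg, List.flatMap_cons]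

lemma pvMain (cs : List Char) : ∀ (h : List Char) (t : List (List Char)),
    pvSplitPct cs = h :: t →
    (∀ ds, pvRef false ds cs = pvBC t) ∧ (∀ ds, pvRef true ds cs = pvSeg ds h ++ pvBC t) := by
  induction cs with
  | nil =>
    intro h t hsp
    simp only [pvSplitPct] at hsp
    injection hsp.symm with e1 e2; subst e1; subst e2
    exact ⟨fun ds => by simp [pvRef, pvBC], fun ds => by simp [pvRef, pvBC, pvSeg, pvLeadDigits]⟩
  | cons c r ih =>
    intro h t hsp
    obtain ⟨h', t', hr⟩ : ∃ h' t', pvSplitPct r = h' :: t' := by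
      cases hx : pvSplitPct r with
      | nil => exact absurd hx (pvSplitPct_ne_nil r)
      | cons a b => exact ⟨a, b, rfl⟩
    obtain ⟨ih1, ih2⟩ := ih h' t' hr
    by_cases hc : c = '%'
    · subst hc
      simp only [pvSplitPct, if_pos, hr] at hsp
      injection hsp with e1 e2; subst e1; subst e2
      constructor
      · intro ds
        simp only [pvRef, if_pos]
        rw [ih2 []]
        simp [pvBC, List.flatMap_cons]
      · intro ds
        simp only [pvRef, if_pos]
        rw [ih2 []]
        simp [pvBC, pvSeg, pvLeadDigits, List.flatMap_cons]
    · simp only [pvSplitPct, if_neg hc, hr] at hsp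
      injection hsp with e1 e2; subst e1; subst e2
      constructor
      · intro ds
        simp only [pvRef, if_neg hc]
        exact ih1 ds
      · intro ds
        by_cases hd : PySem.Chars.isdigit c
        · have h2 : pvSeg (ds ++ [c]) h' = pvSeg ds (c :: h') := by
            simp only [pvSeg, pvLeadDigits, if_pos hd]
            by_cases hlt : pvLeadDigits h' < h'.length
            · simp [hlt, List.take_succ_cons]
            · simp [hlt]
          simp [pvRef, hc, hd, ih2 (ds ++ [c]), h2]
        · have h2 : pvSeg ds (c :: h') = [String.ofList ('%' :: (ds ++ [c]))] := by
            simp only [pvSeg, pvLeadDigits, if_neg hd]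
            simp
          simp [pvRef, hc, hd, ih1 [], h2]

-- ===== VERDICT (by name: the statement is the Claim_ definition above) =====
theorem parseFuncCallParameters_spec : Claim_equal_parseFuncCallParameters := by
  intro text _
  unfold Spec_parseFuncCallParameters parseFuncCallParameters parseFuncCallParameters_alt
  rw [pvFoldA text.toList [] false [] [] (by simp), pvSplitOn_eq]
  obtain ⟨h, t, hsp⟩ : ∃ h t, pvSplitPct text.toList = h :: t := by
    cases hx : pvSplitPct text.toList with
    | nil => exact absurd hx (pvSplitPct_ne_nil _)
    | cons a b => exact ⟨a, b, rfl⟩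
  rw [hsp]
  simp only [List.drop_one, List.tail_cons]
  rw [pvFoldB, (pvMain text.toList h t hsp).1 []]
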